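-- pv_equiv track=rewrite | github.com/HristoSLV/IntroductionToPython | Topics/While loop/Half-life/main.py | num2date
-- ===== SOURCE A (Python) =====
-- def num2date(num):
--     months = [(31, 'jan'), (28, 'feb'), (31, 'mar'), (30, 'apr'),
--               (31, 'may'), (30, 'jun'), (31, 'jul'), (31, 'aug'),
--               (30, 'sep'), (31, 'oct'), (30, 'nov'), (31, 'dec')]
--
--     i = 0
--     for i in range(11, -1, -1):
--         if num > months[11-i][0]:
--             num -= months[11-i][0]
--         else:
--             break
--
--     return (num, months[11-i][1])
-- ===== SOURCE B (Python) =====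
-- _CUM = [(31, 'jan'), (59, 'feb'), (90, 'mar'), (120, 'apr'),
--         (151, 'may'), (181, 'jun'), (212, 'jul'), (243, 'aug'),
--         (273, 'sep'), (304, 'oct'), (334, 'nov'), (365, 'dec')]
--
-- def num2date(num):
--     prev = 0
--     for c, name in _CUM:
--         if num <= c:
--             return (num - prev, name)
--         prev = c
--     return (num - 365, 'dec')
-- ===== Notes on version B (the rewrite author's own statement) =====
-- stated objective: simpler
-- what changed: Replaces the backwards-indexed subtract-and-break loop (mutating num month by month) with a precomputed cumulative day-of-year table scanned once: the first entry with num <= cum gives the answer as num minus the previous cumulative sum.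
import Mathlib
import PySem

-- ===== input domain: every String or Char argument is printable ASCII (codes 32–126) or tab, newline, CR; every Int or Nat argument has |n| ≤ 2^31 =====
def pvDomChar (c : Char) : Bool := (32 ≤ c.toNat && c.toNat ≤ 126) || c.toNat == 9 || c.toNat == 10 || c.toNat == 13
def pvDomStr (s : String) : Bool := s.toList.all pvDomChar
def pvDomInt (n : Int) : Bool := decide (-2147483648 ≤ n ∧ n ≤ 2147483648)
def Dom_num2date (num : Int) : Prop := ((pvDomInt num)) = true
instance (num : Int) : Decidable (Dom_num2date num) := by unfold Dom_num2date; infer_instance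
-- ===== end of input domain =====

-- B replaces A's subtract-and-break loop with a one-pass scan of a precomputed cumulative table (objective: simpler).
-- ===== PORT A =====
def aMonths : List (Int × String) :=
  [(31, "jan"), (28, "feb"), (31, "mar"), (30, "apr"),
   (31, "may"), (30, "jun"), (31, "jul"), (31, "aug"),
   (30, "sep"), (31, "oct"), (30, "nov"), (31, "dec")]

-- the for-loop over range(11,-1,-1) with its break; returns (num, i) as left by the loop
def aLoop : List Int → Int → Int → Int × Int
  | [], num, i => (num, i)
  | j :: rest, num, _ =>
      if num > ((PySem.List.pyGet? aMonths (11 - j)).getD (0, "")).1 then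
        aLoop rest (num - ((PySem.List.pyGet? aMonths (11 - j)).getD (0, "")).1) j
      else (num, j)

def num2date (num : Int) : Int × String :=
  let r := aLoop (PySem.List.pyRange 11 (-1) (-1)) num 0
  (r.1, ((PySem.List.pyGet? aMonths (11 - r.2)).getD (0, "")).2)

-- ===== PORT B =====
def bCum : List (Int × String) :=
  [(31, "jan"), (59, "feb"), (90, "mar"), (120, "apr"),
   (151, "may"), (181, "jun"), (212, "jul"), (243, "aug"),
   (273, "sep"), (304, "oct"), (334, "nov"), (365, "dec")]

def bScan : List (Int × String) → Int → Int → Int × String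
  | [], num, _ => (num - 365, "dec")
  | (c, name) :: rest, num, prev =>
      if num ≤ c then (num - prev, name) else bScan rest num c

def num2date_alt (num : Int) : Int × String := bScan bCum num 0

-- ===== PRECONDITION & SPEC =====
def Spec_num2date (num : Int) (out : Int × String) : Prop := out = num2date_alt num
instance (num : Int) (out : Int × String) : Decidable (Spec_num2date num out) := by unfold Spec_num2date; infer_instance

-- ===== CLAIM (what is proved, stated in full; the proofs are below) =====
def Claim_equal_num2date : Prop := ∀ (num : Int), Dom_num2date num → Spec_num2date num (num2date num)

-- ===== LEMMAS AND PROOFS =====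

-- ===== VERDICT (by name: the statement is the Claim_ definition above) =====
set_option maxHeartbeats 2000000 in
theorem num2date_spec : Claim_equal_num2date := by
  intro num _
  unfold Spec_num2date
  have hr : PySem.List.pyRange 11 (-1) (-1) = [11,10,9,8,7,6,5,4,3,2,1,0] := by decide
  have s11 : ∀ n i : Int, aLoop [11,10,9,8,7,6,5,4,3,2,1,0] n i = if n > 31 then aLoop [10,9,8,7,6,5,4,3,2,1,0] (n - 31) 11 else (n, 11) := fun n i => rfl
  have s10 : ∀ n i : Int, aLoop [10,9,8,7,6,5,4,3,2,1,0] n i = if n > 28 then aLoop [9,8,7,6,5,4,3,2,1,0] (n - 28) 10 else (n, 10) := fun n i => rfl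
  have s9 : ∀ n i : Int, aLoop [9,8,7,6,5,4,3,2,1,0] n i = if n > 31 then aLoop [8,7,6,5,4,3,2,1,0] (n - 31) 9 else (n, 9) := fun n i => rfl
  have s8 : ∀ n i : Int, aLoop [8,7,6,5,4,3,2,1,0] n i = if n > 30 then aLoop [7,6,5,4,3,2,1,0] (n - 30) 8 else (n, 8) := fun n i => rfl
  have s7 : ∀ n i : Int, aLoop [7,6,5,4,3,2,1,0] n i = if n > 31 then aLoop [6,5,4,3,2,1,0] (n - 31) 7 else (n, 7) := fun n i => rfl
  have s6 : ∀ n i : Int, aLoop [6,5,4,3,2,1,0] n i = if n > 30 then aLoop [5,4,3,2,1,0] (n - 30) 6 else (n, 6) := fun n i => rfl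
  have s5 : ∀ n i : Int, aLoop [5,4,3,2,1,0] n i = if n > 31 then aLoop [4,3,2,1,0] (n - 31) 5 else (n, 5) := fun n i => rfl
  have s4 : ∀ n i : Int, aLoop [4,3,2,1,0] n i = if n > 31 then aLoop [3,2,1,0] (n - 31) 4 else (n, 4) := fun n i => rfl
  have s3 : ∀ n i : Int, aLoop [3,2,1,0] n i = if n > 30 then aLoop [2,1,0] (n - 30) 3 else (n, 3) := fun n i => rfl
  have s2 : ∀ n i : Int, aLoop [2,1,0] n i = if n > 31 then aLoop [1,0] (n - 31) 2 else (n, 2) := fun n i => rfl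
  have s1 : ∀ n i : Int, aLoop [1,0] n i = if n > 30 then aLoop [0] (n - 30) 1 else (n, 1) := fun n i => rfl
  have s0 : ∀ n i : Int, aLoop [0] n i = if n > 31 then aLoop [] (n - 31) 0 else (n, 0) := fun n i => rfl
  have sN : ∀ n i : Int, aLoop ([] : List Int) n i = (n, i) := fun n i => rfl
  have t0 : ∀ n p : Int, bScan [((31 : Int), "jan"), ((59 : Int), "feb"), ((90 : Int), "mar"), ((120 : Int), "apr"), ((151 : Int), "may"), ((181 : Int), "jun"), ((212 : Int), "jul"), ((243 : Int), "aug"), ((273 : Int), "sep"), ((304 : Int), "oct"), ((334 : Int), "nov"), ((365 : Int), "dec")] n p = if n ≤ 31 then (n - p, "jan") else bScan [((59 : Int), "feb"), ((90 : Int), "mar"), ((120 : Int), "apr"), ((151 : Int), "may"), ((181 : Int), "jun"), ((212 : Int), "jul"), ((243 : Int), "aug"), ((273 : Int), "sep"), ((304 : Int), "oct"), ((334 : Int), "nov"), ((365 : Int), "dec")] n 31 := fun n p => rfl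
  have t1 : ∀ n p : Int, bScan [((59 : Int), "feb"), ((90 : Int), "mar"), ((120 : Int), "apr"), ((151 : Int), "may"), ((181 : Int), "jun"), ((212 : Int), "jul"), ((243 : Int), "aug"), ((273 : Int), "sep"), ((304 : Int), "oct"), ((334 : Int), "nov"), ((365 : Int), "dec")] n p = if n ≤ 59 then (n - p, "feb") else bScan [((90 : Int), "mar"), ((120 : Int), "apr"), ((151 : Int), "may"), ((181 : Int), "jun"), ((212 : Int), "jul"), ((243 : Int), "aug"), ((273 : Int), "sep"), ((304 : Int), "oct"), ((334 : Int), "nov"), ((365 : Int), "dec")] n 59 := fun n p => rfl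
  have t2 : ∀ n p : Int, bScan [((90 : Int), "mar"), ((120 : Int), "apr"), ((151 : Int), "may"), ((181 : Int), "jun"), ((212 : Int), "jul"), ((243 : Int), "aug"), ((273 : Int), "sep"), ((304 : Int), "oct"), ((334 : Int), "nov"), ((365 : Int), "dec")] n p = if n ≤ 90 then (n - p, "mar") else bScan [((120 : Int), "apr"), ((151 : Int), "may"), ((181 : Int), "jun"), ((212 : Int), "jul"), ((243 : Int), "aug"), ((273 : Int), "sep"), ((304 : Int), "oct"), ((334 : Int), "nov"), ((365 : Int), "dec")] n 90 := fun n p => rfl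
  have t3 : ∀ n p : Int, bScan [((120 : Int), "apr"), ((151 : Int), "may"), ((181 : Int), "jun"), ((212 : Int), "jul"), ((243 : Int), "aug"), ((273 : Int), "sep"), ((304 : Int), "oct"), ((334 : Int), "nov"), ((365 : Int), "dec")] n p = if n ≤ 120 then (n - p, "apr") else bScan [((151 : Int), "may"), ((181 : Int), "jun"), ((212 : Int), "jul"), ((243 : Int), "aug"), ((273 : Int), "sep"), ((304 : Int), "oct"), ((334 : Int), "nov"), ((365 : Int), "dec")] n 120 := fun n p => rfl
  have t4 : ∀ n p : Int, bScan [((151 : Int), "may"), ((181 : Int), "jun"), ((212 : Int), "jul"), ((243 : Int), "aug"), ((273 : Int), "sep"), ((304 : Int), "oct"), ((334 : Int), "nov"), ((365 : Int), "dec")] n p = if n ≤ 151 then (n - p, "may") else bScan [((181 : Int), "jun"), ((212 : Int), "jul"), ((243 : Int), "aug"), ((273 : Int), "sep"), ((304 : Int), "oct"), ((334 : Int), "nov"), ((365 : Int), "dec")] n 151 := fun n p => rfl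
  have t5 : ∀ n p : Int, bScan [((181 : Int), "jun"), ((212 : Int), "jul"), ((243 : Int), "aug"), ((273 : Int), "sep"), ((304 : Int), "oct"), ((334 : Int), "nov"), ((365 : Int), "dec")] n p = if n ≤ 181 then (n - p, "jun") else bScan [((212 : Int), "jul"), ((243 : Int), "aug"), ((273 : Int), "sep"), ((304 : Int), "oct"), ((334 : Int), "nov"), ((365 : Int), "dec")] n 181 := fun n p => rfl
  have t6 : ∀ n p : Int, bScan [((212 : Int), "jul"), ((243 : Int), "aug"), ((273 : Int), "sep"), ((304 : Int), "oct"), ((334 : Int), "nov"), ((365 : Int), "dec")] n p = if n ≤ 212 then (n - p, "jul") else bScan [((243 : Int), "aug"), ((273 : Int), "sep"), ((304 : Int), "oct"), ((334 : Int), "nov"), ((365 : Int), "dec")] n 212 := fun n p => rfl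
  have t7 : ∀ n p : Int, bScan [((243 : Int), "aug"), ((273 : Int), "sep"), ((304 : Int), "oct"), ((334 : Int), "nov"), ((365 : Int), "dec")] n p = if n ≤ 243 then (n - p, "aug") else bScan [((273 : Int), "sep"), ((304 : Int), "oct"), ((334 : Int), "nov"), ((365 : Int), "dec")] n 243 := fun n p => rfl
  have t8 : ∀ n p : Int, bScan [((273 : Int), "sep"), ((304 : Int), "oct"), ((334 : Int), "nov"), ((365 : Int), "dec")] n p = if n ≤ 273 then (n - p, "sep") else bScan [((304 : Int), "oct"), ((334 : Int), "nov"), ((365 : Int), "dec")] n 273 := fun n p => rfl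
  have t9 : ∀ n p : Int, bScan [((304 : Int), "oct"), ((334 : Int), "nov"), ((365 : Int), "dec")] n p = if n ≤ 304 then (n - p, "oct") else bScan [((334 : Int), "nov"), ((365 : Int), "dec")] n 304 := fun n p => rfl
  have t10 : ∀ n p : Int, bScan [((334 : Int), "nov"), ((365 : Int), "dec")] n p = if n ≤ 334 then (n - p, "nov") else bScan [((365 : Int), "dec")] n 334 := fun n p => rfl
  have t11 : ∀ n p : Int, bScan [((365 : Int), "dec")] n p = if n ≤ 365 then (n - p, "dec") else bScan ([] : List (Int × String)) n 365 := fun n p => rfl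
  have tN : ∀ n p : Int, bScan ([] : List (Int × String)) n p = (n - 365, "dec") := fun n p => rfl
  unfold num2date num2date_alt
  by_cases h0 : num ≤ 31
  · have eA : aLoop [11,10,9,8,7,6,5,4,3,2,1,0] num 0 = (num, 11) := by
      rw [s11, if_neg (by omega)]
    have eB : bScan bCum num 0 = (num - 0, "jan") := by
      rw [show bCum = [((31 : Int), "jan"), ((59 : Int), "feb"), ((90 : Int), "mar"), ((120 : Int), "apr"), ((151 : Int), "may"), ((181 : Int), "jun"), ((212 : Int), "jul"), ((243 : Int), "aug"), ((273 : Int), "sep"), ((304 : Int), "oct"), ((334 : Int), "nov"), ((365 : Int), "dec")] from rfl, t0, if_pos (by omega)]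
    rw [hr, eA, eB]
    refine Prod.ext ?_ (by rfl)
    show (num : Int) = num - 0
    omega
  · by_cases h1 : num ≤ 59
    · have eA : aLoop [11,10,9,8,7,6,5,4,3,2,1,0] num 0 = (num - 31, 10) := by
        rw [s11, if_pos (by omega), s10, if_neg (by omega)]
      have eB : bScan bCum num 0 = (num - 31, "feb") := by
        rw [show bCum = [((31 : Int), "jan"), ((59 : Int), "feb"), ((90 : Int), "mar"), ((120 : Int), "apr"), ((151 : Int), "may"), ((181 : Int), "jun"), ((212 : Int), "jul"), ((243 : Int), "aug"), ((273 : Int), "sep"), ((304 : Int), "oct"), ((334 : Int), "nov"), ((365 : Int), "dec")] from rfl, t0, if_neg (by omega), t1, if_pos (by omega)]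
      rw [hr, eA, eB]
      refine Prod.ext ?_ (by rfl)
      show (num - 31 : Int) = num - 31
      omega
    · by_cases h2 : num ≤ 90
      · have eA : aLoop [11,10,9,8,7,6,5,4,3,2,1,0] num 0 = (num - 31 - 28, 9) := by
          rw [s11, if_pos (by omega), s10, if_pos (by omega), s9, if_neg (by omega)]
        have eB : bScan bCum num 0 = (num - 59, "mar") := by
          rw [show bCum = [((31 : Int), "jan"), ((59 : Int), "feb"), ((90 : Int), "mar"), ((120 : Int), "apr"), ((151 : Int), "may"), ((181 : Int), "jun"), ((212 : Int), "jul"), ((243 : Int), "aug"), ((273 : Int), "sep"), ((304 : Int), "oct"), ((334 : Int), "nov"), ((365 : Int), "dec")] from rfl, t0, if_neg (by omega), t1, if_neg (by omega), t2, if_pos (by omega)]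
        rw [hr, eA, eB]
        refine Prod.ext ?_ (by rfl)
        show (num - 31 - 28 : Int) = num - 59
        omega
      · by_cases h3 : num ≤ 120
        · have eA : aLoop [11,10,9,8,7,6,5,4,3,2,1,0] num 0 = (num - 31 - 28 - 31, 8) := by
            rw [s11, if_pos (by omega), s10, if_pos (by omega), s9, if_pos (by omega), s8, if_neg (by omega)]
          have eB : bScan bCum num 0 = (num - 90, "apr") := by
            rw [show bCum = [((31 : Int), "jan"), ((59 : Int), "feb"), ((90 : Int), "mar"), ((120 : Int), "apr"), ((151 : Int), "may"), ((181 : Int), "jun"), ((212 : Int), "jul"), ((243 : Int), "aug"), ((273 : Int), "sep"), ((304 : Int), "oct"), ((334 : Int), "nov"), ((365 : Int), "dec")] from rfl, t0, if_neg (by omega), t1, if_neg (by omega), t2, if_neg (by omega), t3, if_pos (by omega)]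
          rw [hr, eA, eB]
          refine Prod.ext ?_ (by rfl)
          show (num - 31 - 28 - 31 : Int) = num - 90
          omega
        · by_cases h4 : num ≤ 151
          · have eA : aLoop [11,10,9,8,7,6,5,4,3,2,1,0] num 0 = (num - 31 - 28 - 31 - 30, 7) := by
              rw [s11, if_pos (by omega), s10, if_pos (by omega), s9, if_pos (by omega), s8, if_pos (by omega), s7, if_neg (by omega)]
            have eB : bScan bCum num 0 = (num - 120, "may") := by
              rw [show bCum = [((31 : Int), "jan"), ((59 : Int), "feb"), ((90 : Int), "mar"), ((120 : Int), "apr"), ((151 : Int), "may"), ((181 : Int), "jun"), ((212 : Int), "jul"), ((243 : Int), "aug"), ((273 : Int), "sep"), ((304 : Int), "oct"), ((334 : Int), "nov"), ((365 : Int), "dec")] from rfl, t0, if_neg (by omega), t1, if_neg (by omega), t2, if_neg (by omega), t3, if_neg (by omega), t4, if_pos (by omega)]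
            rw [hr, eA, eB]
            refine Prod.ext ?_ (by rfl)
            show (num - 31 - 28 - 31 - 30 : Int) = num - 120
            omega
          · by_cases h5 : num ≤ 181
            · have eA : aLoop [11,10,9,8,7,6,5,4,3,2,1,0] num 0 = (num - 31 - 28 - 31 - 30 - 31, 6) := by
                rw [s11, if_pos (by omega), s10, if_pos (by omega), s9, if_pos (by omega), s8, if_pos (by omega), s7, if_pos (by omega), s6, if_neg (by omega)]
              have eB : bScan bCum num 0 = (num - 151, "jun") := by
                rw [show bCum = [((31 : Int), "jan"), ((59 : Int), "feb"), ((90 : Int), "mar"), ((120 : Int), "apr"), ((151 : Int), "may"), ((181 : Int), "jun"), ((212 : Int), "jul"), ((243 : Int), "aug"), ((273 : Int), "sep"), ((304 : Int), "oct"), ((334 : Int), "nov"), ((365 : Int), "dec")] from rfl, t0, if_neg (by omega), t1, if_neg (by omega), t2, if_neg (by omega), t3, if_neg (by omega), t4, if_neg (by omega), t5, if_pos (by omega)]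
              rw [hr, eA, eB]
              refine Prod.ext ?_ (by rfl)
              show (num - 31 - 28 - 31 - 30 - 31 : Int) = num - 151
              omega
            · by_cases h6 : num ≤ 212
              · have eA : aLoop [11,10,9,8,7,6,5,4,3,2,1,0] num 0 = (num - 31 - 28 - 31 - 30 - 31 - 30, 5) := by
                  rw [s11, if_pos (by omega), s10, if_pos (by omega), s9, if_pos (by omega), s8, if_pos (by omega), s7, if_pos (by omega), s6, if_pos (by omega), s5, if_neg (by omega)]
                have eB : bScan bCum num 0 = (num - 181, "jul") := by
                  rw [show bCum = [((31 : Int), "jan"), ((59 : Int), "feb"), ((90 : Int), "mar"), ((120 : Int), "apr"), ((151 : Int), "may"), ((181 : Int), "jun"), ((212 : Int), "jul"), ((243 : Int), "aug"), ((273 : Int), "sep"), ((304 : Int), "oct"), ((334 : Int), "nov"), ((365 : Int), "dec")] from rfl, t0, if_neg (by omega), t1, if_neg (by omega), t2, if_neg (by omega), t3, if_neg (by omega), t4, if_neg (by omega), t5, if_neg (by omega), t6, if_pos (by omega)]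
                rw [hr, eA, eB]
                refine Prod.ext ?_ (by rfl)
                show (num - 31 - 28 - 31 - 30 - 31 - 30 : Int) = num - 181
                omega
              · by_cases h7 : num ≤ 243
                · have eA : aLoop [11,10,9,8,7,6,5,4,3,2,1,0] num 0 = (num - 31 - 28 - 31 - 30 - 31 - 30 - 31, 4) := by
                    rw [s11, if_pos (by omega), s10, if_pos (by omega), s9, if_pos (by omega), s8, if_pos (by omega), s7, if_pos (by omega), s6, if_pos (by omega), s5, if_pos (by omega), s4, if_neg (by omega)]
                  have eB : bScan bCum num 0 = (num - 212, "aug") := by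
                    rw [show bCum = [((31 : Int), "jan"), ((59 : Int), "feb"), ((90 : Int), "mar"), ((120 : Int), "apr"), ((151 : Int), "may"), ((181 : Int), "jun"), ((212 : Int), "jul"), ((243 : Int), "aug"), ((273 : Int), "sep"), ((304 : Int), "oct"), ((334 : Int), "nov"), ((365 : Int), "dec")] from rfl, t0, if_neg (by omega), t1, if_neg (by omega), t2, if_neg (by omega), t3, if_neg (by omega), t4, if_neg (by omega), t5, if_neg (by omega), t6, if_neg (by omega), t7, if_pos (by omega)]
                  rw [hr, eA, eB]
                  refine Prod.ext ?_ (by rfl)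
                  show (num - 31 - 28 - 31 - 30 - 31 - 30 - 31 : Int) = num - 212
                  omega
                · by_cases h8 : num ≤ 273
                  · have eA : aLoop [11,10,9,8,7,6,5,4,3,2,1,0] num 0 = (num - 31 - 28 - 31 - 30 - 31 - 30 - 31 - 31, 3) := by
                      rw [s11, if_pos (by omega), s10, if_pos (by omega), s9, if_pos (by omega), s8, if_pos (by omega), s7, if_pos (by omega), s6, if_pos (by omega), s5, if_pos (by omega), s4, if_pos (by omega), s3, if_neg (by omega)]
                    have eB : bScan bCum num 0 = (num - 243, "sep") := by
                      rw [show bCum = [((31 : Int), "jan"), ((59 : Int), "feb"), ((90 : Int), "mar"), ((120 : Int), "apr"), ((151 : Int), "may"), ((181 : Int), "jun"), ((212 : Int), "jul"), ((243 : Int), "aug"), ((273 : Int), "sep"), ((304 : Int), "oct"), ((334 : Int), "nov"), ((365 : Int), "dec")] from rfl, t0, if_neg (by omega), t1, if_neg (by omega), t2, if_neg (by omega), t3, if_neg (by omega), t4, if_neg (by omega), t5, if_neg (by omega), t6, if_neg (by omega), t7, if_neg (by omega), t8, if_pos (by omega)]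
                    rw [hr, eA, eB]
                    refine Prod.ext ?_ (by rfl)
                    show (num - 31 - 28 - 31 - 30 - 31 - 30 - 31 - 31 : Int) = num - 243
                    omega
                  · by_cases h9 : num ≤ 304
                    · have eA : aLoop [11,10,9,8,7,6,5,4,3,2,1,0] num 0 = (num - 31 - 28 - 31 - 30 - 31 - 30 - 31 - 31 - 30, 2) := by
                        rw [s11, if_pos (by omega), s10, if_pos (by omega), s9, if_pos (by omega), s8, if_pos (by omega), s7, if_pos (by omega), s6, if_pos (by omega), s5, if_pos (by omega), s4, if_pos (by omega), s3, if_pos (by omega), s2, if_neg (by omega)]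
                      have eB : bScan bCum num 0 = (num - 273, "oct") := by
                        rw [show bCum = [((31 : Int), "jan"), ((59 : Int), "feb"), ((90 : Int), "mar"), ((120 : Int), "apr"), ((151 : Int), "may"), ((181 : Int), "jun"), ((212 : Int), "jul"), ((243 : Int), "aug"), ((273 : Int), "sep"), ((304 : Int), "oct"), ((334 : Int), "nov"), ((365 : Int), "dec")] from rfl, t0, if_neg (by omega), t1, if_neg (by omega), t2, if_neg (by omega), t3, if_neg (by omega), t4, if_neg (by omega), t5, if_neg (by omega), t6, if_neg (by omega), t7, if_neg (by omega), t8, if_neg (by omega), t9, if_pos (by omega)]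
                      rw [hr, eA, eB]
                      refine Prod.ext ?_ (by rfl)
                      show (num - 31 - 28 - 31 - 30 - 31 - 30 - 31 - 31 - 30 : Int) = num - 273
                      omega
                    · by_cases h10 : num ≤ 334
                      · have eA : aLoop [11,10,9,8,7,6,5,4,3,2,1,0] num 0 = (num - 31 - 28 - 31 - 30 - 31 - 30 - 31 - 31 - 30 - 31, 1) := by
                          rw [s11, if_pos (by omega), s10, if_pos (by omega), s9, if_pos (by omega), s8, if_pos (by omega), s7, if_pos (by omega), s6, if_pos (by omega), s5, if_pos (by omega), s4, if_pos (by omega), s3, if_pos (by omega), s2, if_pos (by omega), s1, if_neg (by omega)]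
                        have eB : bScan bCum num 0 = (num - 304, "nov") := by
                          rw [show bCum = [((31 : Int), "jan"), ((59 : Int), "feb"), ((90 : Int), "mar"), ((120 : Int), "apr"), ((151 : Int), "may"), ((181 : Int), "jun"), ((212 : Int), "jul"), ((243 : Int), "aug"), ((273 : Int), "sep"), ((304 : Int), "oct"), ((334 : Int), "nov"), ((365 : Int), "dec")] from rfl, t0, if_neg (by omega), t1, if_neg (by omega), t2, if_neg (by omega), t3, if_neg (by omega), t4, if_neg (by omega), t5, if_neg (by omega), t6, if_neg (by omega), t7, if_neg (by omega), t8, if_neg (by omega), t9, if_neg (by omega), t10, if_pos (by omega)]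
                        rw [hr, eA, eB]
                        refine Prod.ext ?_ (by rfl)
                        show (num - 31 - 28 - 31 - 30 - 31 - 30 - 31 - 31 - 30 - 31 : Int) = num - 304
                        omega
                      · by_cases h11 : num ≤ 365
                        · have eA : aLoop [11,10,9,8,7,6,5,4,3,2,1,0] num 0 = (num - 31 - 28 - 31 - 30 - 31 - 30 - 31 - 31 - 30 - 31 - 30, 0) := by
                            rw [s11, if_pos (by omega), s10, if_pos (by omega), s9, if_pos (by omega), s8, if_pos (by omega), s7, if_pos (by omega), s6, if_pos (by omega), s5, if_pos (by omega), s4, if_pos (by omega), s3, if_pos (by omega), s2, if_pos (by omega), s1, if_pos (by omega), s0, if_neg (by omega)]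
                          have eB : bScan bCum num 0 = (num - 334, "dec") := by
                            rw [show bCum = [((31 : Int), "jan"), ((59 : Int), "feb"), ((90 : Int), "mar"), ((120 : Int), "apr"), ((151 : Int), "may"), ((181 : Int), "jun"), ((212 : Int), "jul"), ((243 : Int), "aug"), ((273 : Int), "sep"), ((304 : Int), "oct"), ((334 : Int), "nov"), ((365 : Int), "dec")] from rfl, t0, if_neg (by omega), t1, if_neg (by omega), t2, if_neg (by omega), t3, if_neg (by omega), t4, if_neg (by omega), t5, if_neg (by omega), t6, if_neg (by omega), t7, if_neg (by omega), t8, if_neg (by omega), t9, if_neg (by omega), t10, if_neg (by omega), t11, if_pos (by omega)]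
                          rw [hr, eA, eB]
                          refine Prod.ext ?_ (by rfl)
                          show (num - 31 - 28 - 31 - 30 - 31 - 30 - 31 - 31 - 30 - 31 - 30 : Int) = num - 334
                          omega
                        · have eA : aLoop [11,10,9,8,7,6,5,4,3,2,1,0] num 0 = (num - 31 - 28 - 31 - 30 - 31 - 30 - 31 - 31 - 30 - 31 - 30 - 31, 0) := by
                            rw [s11, if_pos (by omega), s10, if_pos (by omega), s9, if_pos (by omega), s8, if_pos (by omega), s7, if_pos (by omega), s6, if_pos (by omega), s5, if_pos (by omega), s4, if_pos (by omega), s3, if_pos (by omega), s2, if_pos (by omega), s1, if_pos (by omega), s0, if_pos (by omega), sN]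
                          have eB : bScan bCum num 0 = (num - 365, "dec") := by
                            rw [show bCum = [((31 : Int), "jan"), ((59 : Int), "feb"), ((90 : Int), "mar"), ((120 : Int), "apr"), ((151 : Int), "may"), ((181 : Int), "jun"), ((212 : Int), "jul"), ((243 : Int), "aug"), ((273 : Int), "sep"), ((304 : Int), "oct"), ((334 : Int), "nov"), ((365 : Int), "dec")] from rfl, t0, if_neg (by omega), t1, if_neg (by omega), t2, if_neg (by omega), t3, if_neg (by omega), t4, if_neg (by omega), t5, if_neg (by omega), t6, if_neg (by omega), t7, if_neg (by omega), t8, if_neg (by omega), t9, if_neg (by omega), t10, if_neg (by omega), t11, if_neg (by omega), tN]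
                          rw [hr, eA, eB]
                          refine Prod.ext ?_ (by rfl)
                          show (num - 31 - 28 - 31 - 30 - 31 - 30 - 31 - 31 - 30 - 31 - 30 - 31 : Int) = num - 365
                          omega
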